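-- pv_equiv track=rewrite | github.com/Pr0xximity999/collections | zak-m&ms.py | sortBag
-- ===== SOURCE A (Python) =====
-- def sortBag(collection:type):
--     if type(collection) == list:
--         sortlist = list()
--         for i in collection:
--             if i == "oranje":
--                 sortlist.append(i)
--         for i in collection:
--             if i == "blauw":
--                 sortlist.append(i)
--         for i in collection:
--             if i == "groen":
--                 sortlist.append(i)
--         for i in collection:
--             if i == "bruin":
--                 sortlist.append(i)
--         return sortlist
--     elif type(collection) == dict:
--         return collection
--
--
--
--     return collection
-- ===== SOURCE B (Python) =====
-- def sortBag(collection:type):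
--     if type(collection) == list:
--         o = b = g = br = 0
--         for i in collection:
--             if i == "oranje":
--                 o += 1
--             elif i == "blauw":
--                 b += 1
--             elif i == "groen":
--                 g += 1
--             elif i == "bruin":
--                 br += 1
--         return ["oranje"] * o + ["blauw"] * b + ["groen"] * g + ["bruin"] * br
--     elif type(collection) == dict:
--         return collection
--     return collection
-- ===== Notes on version B (the rewrite author's own statement) =====
-- stated objective: simpler
-- what changed: Replaces four separate filter-append scans over the list with one counting pass (four integer counters) followed by a table-driven construction from replicated color literals.
import Mathlib
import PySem

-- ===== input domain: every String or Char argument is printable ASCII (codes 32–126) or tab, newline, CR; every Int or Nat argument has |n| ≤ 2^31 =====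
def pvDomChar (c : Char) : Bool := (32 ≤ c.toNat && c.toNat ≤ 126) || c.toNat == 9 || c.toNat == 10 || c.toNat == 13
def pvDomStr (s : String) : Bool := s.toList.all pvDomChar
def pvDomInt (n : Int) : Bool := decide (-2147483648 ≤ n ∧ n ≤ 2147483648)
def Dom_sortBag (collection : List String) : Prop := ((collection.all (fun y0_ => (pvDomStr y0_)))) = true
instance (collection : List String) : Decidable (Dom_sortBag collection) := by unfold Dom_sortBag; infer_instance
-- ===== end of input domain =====

-- ===== PORT A =====
-- Under the type convention the argument is always a list, so only the list branch of A is reachable.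
def sortBag (collection : List String) : List String :=
  let sortlist : List String := []
  let sortlist := collection.foldl (fun acc i => if i == "oranje" then acc ++ [i] else acc) sortlist
  let sortlist := collection.foldl (fun acc i => if i == "blauw" then acc ++ [i] else acc) sortlist
  let sortlist := collection.foldl (fun acc i => if i == "groen" then acc ++ [i] else acc) sortlist
  let sortlist := collection.foldl (fun acc i => if i == "bruin" then acc ++ [i] else acc) sortlist
  sortlist

-- ===== PORT B =====
-- one counting pass (four counters), then build the result from replicated literals
def sortBagAltStep (st : Nat × Nat × Nat × Nat) (i : String) : Nat × Nat × Nat × Nat :=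
  let (o, b, g, br) := st
  if i == "oranje" then (o + 1, b, g, br)
  else if i == "blauw" then (o, b + 1, g, br)
  else if i == "groen" then (o, b, g + 1, br)
  else if i == "bruin" then (o, b, g, br + 1)
  else st

def sortBagAltLoop (collection : List String) : Nat × Nat × Nat × Nat :=
  collection.foldl sortBagAltStep (0, 0, 0, 0)

def sortBag_alt (collection : List String) : List String :=
  let (o, b, g, br) := sortBagAltLoop collection
  List.replicate o "oranje" ++ List.replicate b "blauw" ++
  List.replicate g "groen" ++ List.replicate br "bruin"

-- ===== PRECONDITION & SPEC =====
def Spec_sortBag (collection : List String) (out : List String) : Prop := out = sortBag_alt collection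
instance (collection : List String) (out : List String) : Decidable (Spec_sortBag collection out) := by unfold Spec_sortBag; infer_instance

-- ===== CLAIM (what is proved, stated in full; the proofs are below) =====
def Claim_equal_sortBag : Prop := ∀ (collection : List String), Dom_sortBag collection → Spec_sortBag collection (sortBag collection)

-- ===== LEMMAS AND PROOFS =====

-- ===== VERDICT (by name: the statement is the Claim_ definition above) =====
lemma sortBagAltLoop_spec (l : List String) (o b g br : Nat) :
    l.foldl sortBagAltStep (o, b, g, br)
    = (o + l.count "oranje", b + l.count "blauw", g + l.count "groen", br + l.count "bruin") := by
  induction l generalizing o b g br with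
  | nil => simp
  | cons x xs ih =>
    simp only [List.foldl_cons, List.count_cons]
    by_cases h1 : x = "oranje"
    · subst h1; simp only [sortBagAltStep, beq_self_eq_true, if_true, ih]
      simp; omega
    · by_cases h2 : x = "blauw"
      · subst h2
        rw [show sortBagAltStep (o, b, g, br) "blauw" = (o, b + 1, g, br) by simp [sortBagAltStep]]
        rw [ih]; simp; omega
      · by_cases h3 : x = "groen"
        · subst h3
          rw [show sortBagAltStep (o, b, g, br) "groen" = (o, b, g + 1, br) by simp [sortBagAltStep]]
          rw [ih]; simp; omega
        · by_cases h4 : x = "bruin"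
          · subst h4
            rw [show sortBagAltStep (o, b, g, br) "bruin" = (o, b, g, br + 1) by simp [sortBagAltStep]]
            rw [ih]; simp; omega
          · rw [show sortBagAltStep (o, b, g, br) x = (o, b, g, br) by simp [sortBagAltStep, h1, h2, h3, h4]]
            rw [ih]; simp [h1, h2, h3, h4]

lemma filter_beq_eq_replicate (l : List String) (v : String) :
    l.filter (fun i => i == v) = List.replicate (l.count v) v := by
  induction l with
  | nil => simp
  | cons x xs ih =>
    by_cases h : x = v
    · subst h; simp [ih, List.replicate_succ]
    · simp [h, ih]

theorem sortBag_spec : Claim_equal_sortBag := by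
  intro collection _
  unfold Spec_sortBag sortBag sortBag_alt sortBagAltLoop
  rw [sortBagAltLoop_spec]
  simp only [PySem.List.foldl_append_if_eq_filter, filter_beq_eq_replicate, List.nil_append,
    List.append_assoc, Nat.zero_add]
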